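-- pv_equiv track=rewrite | github.com/MareShae/starter-snake-python | app/server.py | snek_no_kiss
-- ===== SOURCE A (Python) =====
-- def snek_no_kiss(snek_x, snek_y, where_is_snek, height, width):
--     snek_body = []
--     for body in where_is_snek:
--         x = body["x"]
--         y = body["y"]
--         snek_body.append([x, y])
--
--     possible_movements = ["up", "left", "down", "right"]
--     y = snek_y - 1
--     if [snek_x, y] in snek_body or y < 0:
--         possible_movements.remove("up")
--     y = snek_y + 1
--     if [snek_x, y] in snek_body or y >= height:
--         possible_movements.remove("down")
--     x = snek_x - 1
--     if [snek_x - 1, snek_y] in snek_body or x < 0: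
--         possible_movements.remove("left")
--     x = snek_x + 1
--     if [snek_x + 1, snek_y] in snek_body or x >= width:
--         possible_movements.remove("right")
--
--     return possible_movements
-- ===== SOURCE B (Python) =====
-- def snek_no_kiss(snek_x, snek_y, where_is_snek, height, width):
--     # Blocked flags start from the board edges; then one pass over the body:
--     # each segment is classified by its offset from the head into the (at most
--     # one) direction it blocks. No per-direction scans of the body.
--     blocked = {
--         "up": snek_y - 1 < 0,
--         "down": snek_y + 1 >= height,
--         "left": snek_x - 1 < 0,
--         "right": snek_x + 1 >= width,
--     }
--     for seg in where_is_snek: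
--         dx = seg["x"] - snek_x
--         dy = seg["y"] - snek_y
--         if dx == 0 and dy == -1:
--             blocked["up"] = True
--         elif dx == 0 and dy == 1:
--             blocked["down"] = True
--         elif dx == -1 and dy == 0:
--             blocked["left"] = True
--         elif dx == 1 and dy == 0:
--             blocked["right"] = True
--     return [m for m in ("up", "left", "down", "right") if not blocked[m]]
-- ===== Notes on version B (the rewrite author's own statement) =====
-- stated objective: alternative
-- what changed: Inverts the loop structure: instead of building the whole body list and scanning it once per direction, B makes a single pass over the body segments, classifying each by its (dx,dy) offset from the head into the one direction it blocks, then filters the fixed move list by the four blocked flags (edges seed the flags).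
import Mathlib
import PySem

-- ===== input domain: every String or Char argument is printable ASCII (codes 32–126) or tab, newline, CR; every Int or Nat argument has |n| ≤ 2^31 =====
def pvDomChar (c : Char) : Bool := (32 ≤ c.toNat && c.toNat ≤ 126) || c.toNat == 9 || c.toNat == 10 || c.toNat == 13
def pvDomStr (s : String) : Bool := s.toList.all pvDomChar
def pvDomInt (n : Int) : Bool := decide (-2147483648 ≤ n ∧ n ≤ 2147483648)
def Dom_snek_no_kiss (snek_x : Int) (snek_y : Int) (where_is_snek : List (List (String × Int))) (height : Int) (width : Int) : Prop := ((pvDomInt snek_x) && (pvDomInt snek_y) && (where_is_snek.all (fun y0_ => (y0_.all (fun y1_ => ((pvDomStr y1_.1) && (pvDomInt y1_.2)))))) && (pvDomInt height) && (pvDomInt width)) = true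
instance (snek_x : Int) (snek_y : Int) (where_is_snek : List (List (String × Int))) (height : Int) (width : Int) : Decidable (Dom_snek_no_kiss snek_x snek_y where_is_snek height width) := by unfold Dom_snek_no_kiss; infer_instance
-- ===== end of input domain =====

-- B inverts the loop: one pass over the body classifies each segment by its offset from the
-- head into the direction it blocks, instead of A's per-direction membership scans (alternative).

-- ===== PORT A =====
-- body["x"] / body["y"] are dict lookups (first match); (lookup …).getD 0 is exact under Pre_.
def snek_no_kiss (snek_x : Int) (snek_y : Int) (where_is_snek : List (List (String × Int))) (height : Int) (width : Int) : List String :=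
  let snek_body : List (Int × Int) :=
    where_is_snek.foldl (fun acc body =>
      acc ++ [((body.lookup "x").getD 0, (body.lookup "y").getD 0)]) []
  let pm0 : List String := ["up", "left", "down", "right"]
  let pm1 := if (snek_x, snek_y - 1) ∈ snek_body ∨ snek_y - 1 < 0
             then (PySem.List.remove? pm0 "up").getD pm0 else pm0
  let pm2 := if (snek_x, snek_y + 1) ∈ snek_body ∨ snek_y + 1 ≥ height
             then (PySem.List.remove? pm1 "down").getD pm1 else pm1
  let pm3 := if (snek_x - 1, snek_y) ∈ snek_body ∨ snek_x - 1 < 0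
             then (PySem.List.remove? pm2 "left").getD pm2 else pm2
  let pm4 := if (snek_x + 1, snek_y) ∈ snek_body ∨ snek_x + 1 ≥ width
             then (PySem.List.remove? pm3 "right").getD pm3 else pm3
  pm4

-- ===== PORT B =====
-- Source B's 'blocked' dict has the four fixed keys up/down/left/right; it is transcribed as a
-- 4-tuple of Bools in that key order, each update writing one component.
-- the loop body of Source B: classify one segment by its offset from the head
def stepB (snek_x : Int) (snek_y : Int) (st : Bool × Bool × Bool × Bool)
    (seg : List (String × Int)) : Bool × Bool × Bool × Bool :=
  let dx := (seg.lookup "x").getD 0 - snek_x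
  let dy := (seg.lookup "y").getD 0 - snek_y
  if dx = 0 ∧ dy = -1 then (true, st.2.1, st.2.2.1, st.2.2.2)
  else if dx = 0 ∧ dy = 1 then (st.1, true, st.2.2.1, st.2.2.2)
  else if dx = -1 ∧ dy = 0 then (st.1, st.2.1, true, st.2.2.2)
  else if dx = 1 ∧ dy = 0 then (st.1, st.2.1, st.2.2.1, true)
  else st

def snek_no_kiss_alt (snek_x : Int) (snek_y : Int) (where_is_snek : List (List (String × Int))) (height : Int) (width : Int) : List String :=
  let init : Bool × Bool × Bool × Bool :=
    (decide (snek_y - 1 < 0), decide (snek_y + 1 ≥ height),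
     decide (snek_x - 1 < 0), decide (snek_x + 1 ≥ width))
  let blocked := where_is_snek.foldl (stepB snek_x snek_y) init
  (["up", "left", "down", "right"] : List String).filter (fun m =>
    ! (if m = "up" then blocked.1 else if m = "down" then blocked.2.1
       else if m = "left" then blocked.2.2.1 else blocked.2.2.2))

-- ===== PRECONDITION & SPEC =====
-- Pre_ excludes inputs where some body segment lacks an "x" or "y" key: there the Python A raises KeyError.
def Pre_snek_no_kiss (snek_x : Int) (snek_y : Int) (where_is_snek : List (List (String × Int))) (height : Int) (width : Int) : Prop :=
  ∀ b ∈ where_is_snek, (b.lookup "x").isSome = true ∧ (b.lookup "y").isSome = true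
instance (snek_x : Int) (snek_y : Int) (where_is_snek : List (List (String × Int))) (height : Int) (width : Int) : Decidable (Pre_snek_no_kiss snek_x snek_y where_is_snek height width) := by unfold Pre_snek_no_kiss; infer_instance

def pvWitness_snek_no_kiss : Int × Int × (List (List (String × Int))) × Int × Int :=
  (1, 1, [[("x", 1), ("y", 0)], [("x", 0), ("y", 1)]], 3, 3)

def Spec_snek_no_kiss (snek_x : Int) (snek_y : Int) (where_is_snek : List (List (String × Int))) (height : Int) (width : Int) (out : List String) : Prop := out = snek_no_kiss_alt snek_x snek_y where_is_snek height width
instance (snek_x : Int) (snek_y : Int) (where_is_snek : List (List (String × Int))) (height : Int) (width : Int) (out : List String) : Decidable (Spec_snek_no_kiss snek_x snek_y where_is_snek height width out) := by unfold Spec_snek_no_kiss; infer_instance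

-- ===== CLAIM (what is proved, stated in full; the proofs are below) =====
def Claim_equal_snek_no_kiss : Prop := ∀ (snek_x : Int) (snek_y : Int) (where_is_snek : List (List (String × Int))) (height : Int) (width : Int), Dom_snek_no_kiss snek_x snek_y where_is_snek height width → Pre_snek_no_kiss snek_x snek_y where_is_snek height width → Spec_snek_no_kiss snek_x snek_y where_is_snek height width (snek_no_kiss snek_x snek_y where_is_snek height width)

-- ===== LEMMAS AND PROOFS =====

-- coordinates of a segment
def segXY (sx sy : Int) (seg : List (String × Int)) : Int × Int :=
  ((seg.lookup "x").getD 0 - sx, (seg.lookup "y").getD 0 - sy)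

-- B's fold, characterised: each flag is its seed OR'd with "some segment sits at that offset".
lemma fold_char (sx sy : Int) (l : List (List (String × Int))) (st : Bool × Bool × Bool × Bool) :
    l.foldl (stepB sx sy) st
    = (st.1 || decide (∃ b ∈ l, segXY sx sy b = (0, -1)),
       st.2.1 || decide (∃ b ∈ l, segXY sx sy b = (0, 1)),
       st.2.2.1 || decide (∃ b ∈ l, segXY sx sy b = (-1, 0)),
       st.2.2.2 || decide (∃ b ∈ l, segXY sx sy b = (1, 0))) := by
  induction l generalizing st with
  | nil => simp
  | cons b t ih =>
    have hb : segXY sx sy b = ((b.lookup "x").getD 0 - sx, (b.lookup "y").getD 0 - sy) := rfl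
    simp only [List.foldl_cons, List.exists_mem_cons_iff, hb, Prod.mk.injEq, stepB]
    split_ifs with h1 h2 h3 h4
    · rw [ih]; obtain ⟨p, q⟩ := h1; simp [p, q]
    · rw [ih]; obtain ⟨p, q⟩ := h2; simp [p, q]
    · rw [ih]; obtain ⟨p, q⟩ := h3; simp [p, q]
    · rw [ih]; obtain ⟨p, q⟩ := h4; simp [p, q]
    · rw [ih]; simp [h1, h2, h3, h4]

-- A's body list as a membership statement about the segments.
lemma mem_bodyList (w : List (List (String × Int))) (p : Int × Int) :
    (p ∈ w.foldl (fun acc body =>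
        acc ++ [((body.lookup "x").getD 0, (body.lookup "y").getD 0)]) ([] : List (Int × Int)))
    ↔ ∃ b ∈ w, ((b.lookup "x").getD 0, (b.lookup "y").getD 0) = p := by
  rw [PySem.List.foldl_append_singleton_eq_map]
  simp [List.mem_map, eq_comm]

-- offset form ↔ absolute form of the membership conditions
lemma segXY_iff (sx sy a b : Int) (w : List (List (String × Int))) :
    (∃ s ∈ w, segXY sx sy s = (a, b))
    ↔ ∃ s ∈ w, ((s.lookup "x").getD 0, (s.lookup "y").getD 0) = (sx + a, sy + b) := by
  unfold segXY
  constructor <;> rintro ⟨s, hs, h⟩ <;> refine ⟨s, hs, ?_⟩ <;>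
    simp only [Prod.mk.injEq] at h ⊢ <;> omega

-- A's remove-chain written out, as a function of its four abstract conditions.
lemma chainA (cu cd cl cr : Prop) [Decidable cu] [Decidable cd] [Decidable cl] [Decidable cr] :
    (let pm0 : List String := ["up", "left", "down", "right"]
     let pm1 := if cu then (PySem.List.remove? pm0 "up").getD pm0 else pm0
     let pm2 := if cd then (PySem.List.remove? pm1 "down").getD pm1 else pm1
     let pm3 := if cl then (PySem.List.remove? pm2 "left").getD pm2 else pm2
     let pm4 := if cr then (PySem.List.remove? pm3 "right").getD pm3 else pm3
     pm4)
    = (if cu then [] else ["up"]) ++ (if cl then [] else ["left"])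
      ++ (if cd then [] else ["down"]) ++ (if cr then [] else ["right"]) := by
  by_cases hu : cu <;> by_cases hd : cd <;> by_cases hl : cl <;> by_cases hr : cr <;>
    simp only [hu, hd, hl, hr, if_true, if_false, iff_true, iff_false] <;> rfl

-- B's filter over the fixed 4-list written out.
lemma filterB (bu bd bl br : Bool) :
    (["up", "left", "down", "right"] : List String).filter (fun m =>
      ! (if m = "up" then bu else if m = "down" then bd
         else if m = "left" then bl else br))
    = (if bu then [] else ["up"]) ++ (if bl then [] else ["left"])
      ++ (if bd then [] else ["down"]) ++ (if br then [] else ["right"]) := by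
  cases bu <;> cases bd <;> cases bl <;> cases br <;> rfl

-- one direction's membership, offset form to A's body-list form
lemma dir_iff (sx sy a b u v : Int) (hu : u = sx + a) (hv : v = sy + b)
    (w : List (List (String × Int))) :
    (∃ s ∈ w, segXY sx sy s = (a, b))
    ↔ (u, v) ∈ w.foldl (fun acc body =>
        acc ++ [((body.lookup "x").getD 0, (body.lookup "y").getD 0)]) ([] : List (Int × Int)) := by
  rw [segXY_iff, mem_bodyList, hu, hv]

-- bridge: one legality if, B-form to A-form
lemma ifleg (edge p q : Prop) [Decidable edge] [Decidable p] [Decidable q] (hpq : p ↔ q)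
    (n : List String) :
    (if (decide edge || decide p) = true then ([] : List String) else n)
    = if q ∨ edge then [] else n := by
  have hq : q ↔ p := hpq.symm
  by_cases hp : p <;> by_cases he : edge <;> simp [hp, he, hq]

-- ===== VERDICT (by name: the statement is the Claim_ definition above) =====
theorem snek_no_kiss_spec : Claim_equal_snek_no_kiss := by
  intro sx sy w h wd _ _
  unfold Spec_snek_no_kiss snek_no_kiss snek_no_kiss_alt
  rw [chainA]
  simp only [fold_char, filterB]
  rw [ifleg _ _ _ (dir_iff sx sy 0 (-1) sx (sy - 1) (by ring) (by ring) w),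
      ifleg _ _ _ (dir_iff sx sy 0 1 sx (sy + 1) (by ring) (by ring) w),
      ifleg _ _ _ (dir_iff sx sy (-1) 0 (sx - 1) sy (by ring) (by ring) w),
      ifleg _ _ _ (dir_iff sx sy 1 0 (sx + 1) sy (by ring) (by ring) w)]
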